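-- pv_equiv track=rewrite | github.com/softwaresaved/international-survey | analysis/include/likertScalePlot.py | wrap_labels
-- ===== SOURCE A (Python) =====
-- def wrap_labels(label, max_size=30):
--     """
--     Function to automatically wrap labels if they are too long
--     Split only if whitespace
--     params:
--         :labels str(): string that contains the labels
--         :max_size int(): 20 by Default, the size of the string
--         before being wrapped
--     :return:
--         :str() of wrapped labels according to the max size
--     """
--     def split_at_whitespace(label):
--         label_to_return = list()
--         n = 0
--         for letter in label:
--             n +=1
--             if n >= max_size:
--                 if letter == ' ':
--                     letter = '\n'
--                     n = 0
--             label_to_return.append(letter)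
--         return ''.join(label_to_return)
--
--     return split_at_whitespace(label)
-- ===== SOURCE B (Python) =====
-- def wrap_labels(label, max_size=30):
--     out = []
--     rest = label
--     while True:
--         i = rest.find(' ', max(max_size - 1, 0))
--         if i == -1:
--             out.append(rest)
--             return ''.join(out)
--         out.append(rest[:i])
--         out.append('\n')
--         rest = rest[i + 1:]
-- ===== Notes on version B (the rewrite author's own statement) =====
-- stated objective: faster
-- what changed: A scans the label character by character with a Python-level counter, rewriting a space into a newline when the counter reaches max_size; B instead loops over line segments, using C-level str.find with start index max_size-1 to jump straight to each break point, slicing the segment off and continuing on the tail.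
import Mathlib
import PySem

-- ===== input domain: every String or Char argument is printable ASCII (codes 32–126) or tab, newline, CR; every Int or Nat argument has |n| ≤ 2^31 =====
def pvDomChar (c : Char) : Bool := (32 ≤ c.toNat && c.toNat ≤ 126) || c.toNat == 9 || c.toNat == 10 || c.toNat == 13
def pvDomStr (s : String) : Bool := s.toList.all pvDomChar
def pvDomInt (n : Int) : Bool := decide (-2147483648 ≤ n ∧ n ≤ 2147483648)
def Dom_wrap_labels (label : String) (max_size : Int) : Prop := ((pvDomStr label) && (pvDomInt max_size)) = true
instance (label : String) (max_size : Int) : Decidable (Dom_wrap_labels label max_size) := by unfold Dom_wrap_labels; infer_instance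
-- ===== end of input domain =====

-- B replaces A's per-character counter scan by a segment loop: repeatedly search
-- (str.find) for the first space at index ≥ max_size-1, cut there, recurse on the
-- tail (objective: same O(n) cost, different decomposition).

-- ===== PORT A =====
-- literal port of A: one pass over the characters, counter n, append each letter
def stepA (max_size : Int) (st : Int × List Char) (letter : Char) : Int × List Char :=
  let n := st.1 + 1
  if n ≥ max_size ∧ letter = ' ' then (0, st.2 ++ ['\n'])
  else (n, st.2 ++ [letter])

def wrap_labels (label : String) (max_size : Int) : String :=
  String.ofList (label.toList.foldl (stepA max_size) (0, [])).2

-- ===== PORT B =====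
-- hand port of Python str.find(' ', start) on chars (exact: first index ≥ start
-- holding ' ', none when absent; the Python start is clamped to ≥ 0 by max)
def findSp : Nat → List Char → Option Nat
  | _, [] => none
  | 0, c :: cs => if c = ' ' then some 0 else (findSp 0 cs).map (· + 1)
  | k+1, _ :: cs => (findSp k cs).map (· + 1)

theorem findSp_lt : ∀ (k : Nat) (cs : List Char) (i : Nat), findSp k cs = some i → i < cs.length := by
  intro k cs
  induction cs generalizing k with
  | nil => intro i h; simp [findSp] at h
  | cons c cs ih =>
      intro i h
      match k with
      | 0 =>
          by_cases hc : c = ' '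
          · simp [findSp, hc] at h
            simp [← h]
          · simp [findSp, hc] at h
            obtain ⟨j, hj, hji⟩ := h
            have := ih 0 j hj; simp; omega
      | k+1 =>
          simp [findSp] at h
          obtain ⟨j, hj, hji⟩ := h
          have := ih k j hj; simp; omega

-- the while loop of Source B: cut at the found space, emit '\n', continue on the tail
def wrapGo (m : Int) (cs : List Char) : List Char :=
  match h : findSp (max (m - 1) 0).toNat cs with
  | none => cs
  | some i => cs.take i ++ '\n' :: wrapGo m (cs.drop (i + 1))
termination_by cs.length
decreasing_by
  have := findSp_lt _ _ _ h
  simp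
  omega

def wrap_labels_alt (label : String) (max_size : Int) : String :=
  String.ofList (wrapGo max_size label.toList)

-- ===== PRECONDITION & SPEC =====
def Spec_wrap_labels (label : String) (max_size : Int) (out : String) : Prop := out = wrap_labels_alt label max_size
instance (label : String) (max_size : Int) (out : String) : Decidable (Spec_wrap_labels label max_size out) := by unfold Spec_wrap_labels; infer_instance

-- ===== CLAIM =====
def Claim_equal_wrap_labels : Prop := ∀ (label : String) (max_size : Int), Dom_wrap_labels label max_size → Spec_wrap_labels label max_size (wrap_labels label max_size)

-- ===== LEMMAS AND PROOFS =====

-- A's loop as a structural recursion on the characters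
def fA (m : Int) (n : Int) : List Char → List Char
  | [] => []
  | c :: cs => if n + 1 ≥ m ∧ c = ' ' then '\n' :: fA m 0 cs else c :: fA m (n + 1) cs

theorem foldlA_eq (m : Int) (cs : List Char) : ∀ (n : Int) (acc : List Char),
    (cs.foldl (stepA m) (n, acc)).2 = acc ++ fA m n cs := by
  induction cs with
  | nil => intro n acc; simp [fA]
  | cons c cs ih =>
      intro n acc
      simp only [List.foldl_cons, fA, stepA]
      by_cases h : n + 1 ≥ m ∧ c = ' '
      · simp [h, ih]
      · simp [h, ih]

-- one step of B's loop with an arbitrary search start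
def wrapAux (m : Int) (k : Nat) (cs : List Char) : List Char :=
  match findSp k cs with
  | none => cs
  | some i => cs.take i ++ '\n' :: wrapGo m (cs.drop (i + 1))

theorem wrapGo_eq_aux (m : Int) (cs : List Char) :
    wrapGo m cs = wrapAux m (m - 1).toNat cs := by
  rw [wrapGo, wrapAux]
  have h1 : (max (m - 1) 0).toNat = (m - 1).toNat := by omega
  rw [h1]
  cases hf : findSp (m - 1).toNat cs <;> simp

theorem wrapAux_shift (m : Int) (k k' : Nat) (c : Char) (cs : List Char)
    (h : findSp k (c :: cs) = (findSp k' cs).map (· + 1)) :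
    wrapAux m k (c :: cs) = c :: wrapAux m k' cs := by
  unfold wrapAux
  rw [h]
  cases hf : findSp k' cs with
  | none => simp
  | some i => simp

theorem fA_eq_aux (m : Int) (cs : List Char) : ∀ (n : Int), 0 ≤ n →
    fA m n cs = wrapAux m (m - n - 1).toNat cs := by
  induction cs with
  | nil => intro n _; simp [fA, wrapAux, findSp]
  | cons c cs ih =>
      intro n hn
      by_cases h : n + 1 ≥ m ∧ c = ' '
      · have hk : (m - n - 1).toNat = 0 := by omega
        rw [show fA m n (c :: cs) = '\n' :: fA m 0 cs by simp [fA, h]]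
        rw [hk]
        rw [show wrapAux m 0 (c :: cs) = '\n' :: wrapGo m cs by
          unfold wrapAux; simp [findSp, h.2]]
        rw [ih 0 le_rfl, wrapGo_eq_aux]
        simp
      · rw [show fA m n (c :: cs) = c :: fA m (n + 1) cs by
          simp only [fA]; rw [if_neg h]]
        rw [ih (n + 1) (by omega)]
        apply Eq.symm
        rcases Nat.eq_zero_or_pos (m - n - 1).toNat with hk | hk
        · have hm : n + 1 ≥ m := by omega
          have hc : c ≠ ' ' := fun hc => h ⟨hm, hc⟩
          have hk' : (m - (n + 1) - 1).toNat = 0 := by omega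
          rw [hk, hk']
          exact wrapAux_shift m 0 0 c cs (by simp [findSp, hc])
        · have hj : (m - n - 1).toNat = ((m - n - 1).toNat - 1) + 1 := by omega
          set j := (m - n - 1).toNat - 1 with hjd
          have hk' : (m - (n + 1) - 1).toNat = j := by omega
          rw [hj, hk']
          exact wrapAux_shift m (j + 1) j c cs (by simp [findSp])

-- ===== VERDICT =====
theorem wrap_labels_spec : Claim_equal_wrap_labels := by
  intro label m _
  show wrap_labels label m = wrap_labels_alt label m
  simp only [wrap_labels, wrap_labels_alt]
  rw [foldlA_eq, fA_eq_aux m label.toList 0 le_rfl, wrapGo_eq_aux]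
  norm_num
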